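-- pv_equiv track=rewrite | github.com/Dend0x/MUNI_FI | ib111/Opakovani/01/01/v2_dnsum.py | sum_elements_dn
-- ===== SOURCE A (Python) =====
-- def sum_elements_dn(div, nondiv, count):
--     result = 0
--     number = div
--     while count > 0:
--         if number % nondiv != 0:
--             result += number
--             count -= 1
--         number += div
--     return result
-- ===== SOURCE B (Python) =====
-- def sum_elements_dn(div, nondiv, count):
--     # Closed form: the valid multiples are div*k for k >= 1 with m !| k,
--     # where m = |nondiv| / gcd(|div|, |nondiv|).  O(1) arithmetic.
--     if count <= 0:
--         return 0
--     g = abs(div)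
--     b = abs(nondiv)
--     while b:
--         g, b = b, g % b
--     m = abs(nondiv) // g
--     q, r = divmod(count - 1, m - 1)
--     K = q * m + r + 1              # index of the count-th valid multiple
--     Q = K // m                     # number of skipped (invalid) indices <= K
--     s = (K * (K + 1) - m * (Q * (Q + 1))) // 2   # sum of valid indices 1..K
--     return div * s
-- ===== Notes on version B (the rewrite author's own statement) =====
-- stated objective: faster
-- what changed: Replaces the scan over successive multiples by a closed-form arithmetic-series formula: the count-th kept multiple has index q*m+r+1 over the period m = |nondiv|/gcd(|div|,|nondiv|), and the sum of kept indices is a Gauss sum minus the skipped multiples of m.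
import Mathlib
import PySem

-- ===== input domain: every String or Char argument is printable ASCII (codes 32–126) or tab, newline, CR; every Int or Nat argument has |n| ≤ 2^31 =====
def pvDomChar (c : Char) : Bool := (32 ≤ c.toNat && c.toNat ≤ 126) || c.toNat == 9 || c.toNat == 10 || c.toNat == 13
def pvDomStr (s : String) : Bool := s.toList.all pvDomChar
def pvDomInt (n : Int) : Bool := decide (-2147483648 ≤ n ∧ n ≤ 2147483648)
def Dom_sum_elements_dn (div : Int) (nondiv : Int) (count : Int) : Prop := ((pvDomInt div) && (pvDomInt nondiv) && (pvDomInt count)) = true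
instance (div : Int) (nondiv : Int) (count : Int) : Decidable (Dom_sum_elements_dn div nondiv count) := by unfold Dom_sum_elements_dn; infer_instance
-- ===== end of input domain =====

-- B replaces A's one-by-one scan over multiples by a closed-form arithmetic-series formula (faster).

-- ===== PORT A =====
-- Python's `while count > 0` loop; the fuel argument is only a totalization guard
-- (inside Pre_ the loop performs at most count*|nondiv| iterations, and the fuel is never exhausted).
def pvLoopA (div nondiv : Int) : Nat → Int → Int → Int → Int
  | 0, result, _, _ => result
  | fuel + 1, result, number, count =>
    if 0 < count then
      if PySem.Int.mod number nondiv ≠ 0 then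
        pvLoopA div nondiv fuel (result + number) (number + div) (count - 1)
      else
        pvLoopA div nondiv fuel result (number + div) count
    else result

def sum_elements_dn (div : Int) (nondiv : Int) (count : Int) : Int :=
  pvLoopA div nondiv (count.toNat * nondiv.natAbs + 1) 0 div count

-- ===== PORT B =====
-- Source B's Euclid loop `while b: g, b = b, g % b` (on abs values, so over Nat; Python's % = Nat.% there)
def pvGcdB (g b : Nat) : Nat :=
  if b = 0 then g else pvGcdB b (g % b)
decreasing_by exact Nat.mod_lt _ (by omega)

-- Source B step for step; all intermediate Python ints here are nonnegative, so they are ported as Nat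
-- (Python's //, %, divmod agree with Nat division on them).
def sum_elements_dn_alt (div : Int) (nondiv : Int) (count : Int) : Int :=
  if count ≤ 0 then 0
  else
    let g := pvGcdB div.natAbs nondiv.natAbs
    let m := nondiv.natAbs / g
    let q := (count - 1).toNat / (m - 1)
    let r := (count - 1).toNat % (m - 1)
    let K := q * m + r + 1
    let Q := K / m
    let s := (K * (K + 1) - m * (Q * (Q + 1))) / 2
    div * (s : Int)

-- ===== PRECONDITION & SPEC =====
-- Pre_ excludes exactly the inputs where A does not return: with count > 0, A raises
-- ZeroDivisionError when nondiv = 0 and loops forever when nondiv divides div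
-- (then every multiple of div is divisible by nondiv, so count never decreases).
def Pre_sum_elements_dn (div : Int) (nondiv : Int) (count : Int) : Prop :=
  count ≤ 0 ∨ (nondiv ≠ 0 ∧ ¬ (nondiv ∣ div))
instance (div : Int) (nondiv : Int) (count : Int) : Decidable (Pre_sum_elements_dn div nondiv count) := by
  unfold Pre_sum_elements_dn; infer_instance

def pvWitness_sum_elements_dn : Int × Int × Int := (3, 2, 4)

def Spec_sum_elements_dn (div : Int) (nondiv : Int) (count : Int) (out : Int) : Prop := out = sum_elements_dn_alt div nondiv count
instance (div : Int) (nondiv : Int) (count : Int) (out : Int) : Decidable (Spec_sum_elements_dn div nondiv count out) := by unfold Spec_sum_elements_dn; infer_instance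

-- ===== CLAIM (what is proved, stated in full; the proofs are below) =====
def Claim_equal_sum_elements_dn : Prop := ∀ (div : Int) (nondiv : Int) (count : Int), Dom_sum_elements_dn div nondiv count → Pre_sum_elements_dn div nondiv count → Spec_sum_elements_dn div nondiv count (sum_elements_dn div nondiv count)

-- ===== LEMMAS AND PROOFS =====

-- the Euclid loop computes the gcd
theorem pvGcdB_eq (g b : Nat) : pvGcdB g b = Nat.gcd g b := by
  induction g, b using pvGcdB.induct with
  | case1 g => rw [pvGcdB]; simp
  | case2 g b hb ih =>
    rw [pvGcdB]
    simp only [hb, if_false, ih]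
    rw [Nat.gcd_comm b, ← Nat.gcd_rec, Nat.gcd_comm]

-- next valid index after k (valid: not a multiple of m); with m ≥ 2 two consecutive
-- indices are never both multiples of m, so the next valid index is k+1 or k+2
def pvNext (m k : Nat) : Nat := if m ∣ (k + 1) then k + 2 else k + 1

-- index of the n-th valid index strictly after k
def pvNV (m k : Nat) : Nat → Nat
  | 0 => k
  | n + 1 => pvNV m (pvNext m k) n

-- sum of the valid indices ≤ K
def pvFS (m K : Nat) : Nat := ∑ j ∈ Finset.range (K + 1), if m ∣ j then 0 else j

theorem pvNV_le (m k n : Nat) (hm : 2 ≤ m) : pvNV m k n ≤ k + n * m := by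
  induction n generalizing k with
  | zero => simp [pvNV]
  | succ n ih =>
    have h1 : pvNext m k ≤ k + m := by unfold pvNext; split <;> omega
    calc pvNV m k (n+1) = pvNV m (pvNext m k) n := rfl
      _ ≤ pvNext m k + n * m := ih _
      _ ≤ k + (n+1) * m := by rw [Nat.succ_mul]; omega

theorem pvNV_ge (m k n : Nat) : k + n ≤ pvNV m k n := by
  induction n generalizing k with
  | zero => simp [pvNV]
  | succ n ih =>
    have h1 : k + 1 ≤ pvNext m k := by unfold pvNext; split <;> omega
    have := ih (pvNext m k)
    calc k + (n+1) ≤ pvNext m k + n := by omega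
      _ ≤ pvNV m (pvNext m k) n := ih _

theorem pvNV_succ (m k n : Nat) : pvNV m k (n + 1) = pvNext m (pvNV m k n) := by
  induction n generalizing k with
  | zero => rfl
  | succ n ih => exact ih (pvNext m k)

theorem pvFS_succ (m K : Nat) :
    pvFS m (K + 1) = pvFS m K + (if m ∣ (K + 1) then 0 else K + 1) := by
  unfold pvFS
  rw [Finset.sum_range_succ]

-- divisibility of a multiple of div by nondiv is periodic with period m
theorem pv_dvd_iff (div nondiv : Int) (hn : nondiv ≠ 0) (t : Nat) :
    nondiv ∣ div * (t : Int) ↔ (nondiv.natAbs / Nat.gcd div.natAbs nondiv.natAbs) ∣ t := by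
  rw [← Int.natAbs_dvd_natAbs, Int.natAbs_mul, Int.natAbs_natCast]
  set D := div.natAbs with hD0
  set N := nondiv.natAbs with hN0
  have hN : 0 < N := Int.natAbs_pos.mpr hn
  set g := Nat.gcd D N with hg
  have hg0 : 0 < g := Nat.gcd_pos_of_pos_right _ hN
  obtain ⟨D', hD'⟩ := Nat.gcd_dvd_left D N
  obtain ⟨N', hN'⟩ := Nat.gcd_dvd_right D N
  have hcop : Nat.Coprime (D / g) (N / g) := Nat.coprime_div_gcd_div_gcd hg0
  have hD'' : D / g = D' := by rw [hD', Nat.mul_div_cancel_left _ hg0]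
  have hN'' : N / g = N' := by rw [hN', Nat.mul_div_cancel_left _ hg0]
  rw [hN'']
  constructor
  · intro h
    have h1 : g * N' ∣ g * (D' * t) := by
      rw [← hN', ← mul_assoc, ← hD']; exact h
    have h2 : N' ∣ D' * t := (mul_dvd_mul_iff_left (by omega : g ≠ 0)).mp h1
    have hcop' : Nat.Coprime N' D' := by rw [← hD'', ← hN'']; exact hcop.symm
    exact hcop'.dvd_of_dvd_mul_left h2
  · intro h
    calc N = g * N' := hN'
      _ ∣ g * t := mul_dvd_mul_left g h
      _ ∣ D * t := ⟨D', by rw [hD']; ring⟩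

theorem pv_m_ge_two (div nondiv : Int) (hn : nondiv ≠ 0) (hd : ¬ nondiv ∣ div) :
    2 ≤ nondiv.natAbs / Nat.gcd div.natAbs nondiv.natAbs := by
  set D := div.natAbs with hD0
  set N := nondiv.natAbs with hN0
  have hN : 0 < N := Int.natAbs_pos.mpr hn
  set g := Nat.gcd D N with hg
  have hg0 : 0 < g := Nat.gcd_pos_of_pos_right _ hN
  have hNg : g ∣ N := Nat.gcd_dvd_right D N
  have h1 : 1 ≤ N / g := (Nat.one_le_div_iff hg0).mpr (Nat.le_of_dvd hN hNg)
  rcases Nat.lt_or_ge (N / g) 2 with h | h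
  · exfalso
    have he1 : N / g = 1 := by omega
    have hNe : N = g := by
      have := Nat.div_mul_cancel hNg
      rw [he1, one_mul] at this
      omega
    apply hd
    rw [← Int.natAbs_dvd_natAbs, ← hD0, ← hN0, hNe]
    exact Nat.gcd_dvd_left D N
  · exact h

-- main loop invariant: from number = div*(k+1) with n items still wanted,
-- the loop adds div times the sum of the valid indices in (k, NV m k n]
theorem pv_loop_eq (div nondiv : Int) (hn : nondiv ≠ 0) (hd : ¬ nondiv ∣ div)
    (fuel : Nat) : ∀ (k : Nat) (n result : Int),
    pvNV (nondiv.natAbs / Nat.gcd div.natAbs nondiv.natAbs) k n.toNat ≤ k + fuel →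
    pvLoopA div nondiv fuel result (div * ((k : Int) + 1)) n =
      result + div * ((pvFS (nondiv.natAbs / Nat.gcd div.natAbs nondiv.natAbs)
          (pvNV (nondiv.natAbs / Nat.gcd div.natAbs nondiv.natAbs) k n.toNat) : Int)
        - (pvFS (nondiv.natAbs / Nat.gcd div.natAbs nondiv.natAbs) k : Int)) := by
  set m := nondiv.natAbs / Nat.gcd div.natAbs nondiv.natAbs with hmdef
  have hm2 : 2 ≤ m := pv_m_ge_two div nondiv hn hd
  induction fuel with
  | zero =>
    intro k n result hfuel
    have h0 := pvNV_ge m k n.toNat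
    have hn0 : n.toNat = 0 := by omega
    rw [hn0]
    simp [pvLoopA, pvNV]
  | succ fuel ih =>
    intro k n result hfuel
    by_cases hpos : 0 < n
    · have htn : n.toNat = (n - 1).toNat + 1 := by omega
      have hmod : (PySem.Int.mod (div * ((k : Int) + 1)) nondiv = 0) ↔ (m ∣ (k + 1)) := by
        rw [PySem.Int.mod_eq_zero_iff_dvd]
        have h := pv_dvd_iff div nondiv hn (k + 1)
        rw [← hmdef] at h
        have hcast : ((k + 1 : Nat) : Int) = (k : Int) + 1 := by push_cast; ring
        rw [hcast] at h
        exact h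
      have hnum : div * ((k : Int) + 1) + div = div * (((k + 1 : Nat) : Int) + 1) := by
        push_cast; ring
      rw [pvLoopA, if_pos hpos]
      by_cases hdv : m ∣ (k + 1)
      · -- this multiple is divisible by nondiv: skipped
        rw [if_neg (by simp [hmod.mpr hdv]), hnum]
        have hnx1 : pvNext m k = k + 2 := by unfold pvNext; rw [if_pos hdv]
        have hnx2 : pvNext m (k + 1) = k + 2 := by
          unfold pvNext
          rw [if_neg]
          intro h2
          have h1 : m ∣ 1 := by
            have := Nat.dvd_sub h2 hdv
            simpa using this
          have := Nat.le_of_dvd (by omega) h1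
          omega
        have hNV : pvNV m k n.toNat = pvNV m (k + 1) n.toNat := by
          rw [htn]
          show pvNV m (pvNext m k) ((n - 1).toNat) = pvNV m (pvNext m (k + 1)) ((n - 1).toNat)
          rw [hnx1, hnx2]
        have hfuel' : pvNV m (k + 1) n.toNat ≤ (k + 1) + fuel := by rw [← hNV]; omega
        rw [ih (k + 1) n result hfuel', hNV]
        have hFS : pvFS m (k + 1) = pvFS m k := by rw [pvFS_succ, if_pos hdv]; ring
        rw [hFS]
      · -- this multiple is kept
        rw [if_pos (by simp [Ne, hmod, hdv]), hnum]
        have hNV : pvNV m k n.toNat = pvNV m (k + 1) (n - 1).toNat := by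
          rw [htn]
          show pvNV m (pvNext m k) ((n - 1).toNat) = pvNV m (k + 1) ((n - 1).toNat)
          have : pvNext m k = k + 1 := by unfold pvNext; rw [if_neg hdv]
          rw [this]
        have hfuel' : pvNV m (k + 1) (n - 1).toNat ≤ (k + 1) + fuel := by rw [← hNV]; omega
        rw [ih (k + 1) (n - 1) (result + div * ((k : Int) + 1)) hfuel', hNV]
        have hFS : (pvFS m (k + 1) : Int) = (pvFS m k : Int) + ((k : Int) + 1) := by
          rw [pvFS_succ, if_neg hdv]; push_cast; ring
        rw [hFS]; ring
    · rw [pvLoopA, if_neg hpos]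
      have h0 : n.toNat = 0 := by omega
      rw [h0]
      simp [pvNV]

-- the n-th valid index in closed form
theorem pvNV_closed (m n : Nat) (hm : 2 ≤ m) (hn : 1 ≤ n) :
    pvNV m 0 n = ((n - 1) / (m - 1)) * m + (n - 1) % (m - 1) + 1 := by
  induction n, hn using Nat.le_induction with
  | base =>
    have h1 : ¬ m ∣ 1 := by
      intro h; have := Nat.le_of_dvd (by omega) h; omega
    simp [pvNV, pvNext, h1]
  | succ n hn ih =>
    rw [pvNV_succ, ih]
    have he : 1 ≤ m - 1 := by omega
    set e := m - 1 with hE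
    set a := (n - 1) / e with ha
    set b := (n - 1) % e with hbdef
    have hb : b < e := Nat.mod_lt _ (by omega)
    have hab : e * a + b = n - 1 := Nat.div_add_mod (n - 1) e
    have hsim : n + 1 - 1 = n := rfl
    rw [hsim]
    rcases Nat.lt_or_ge (b + 1) e with hcase | hcase
    · -- the next index is still inside the current block
      have hne : n = (b + 1) + a * e := by rw [mul_comm a e]; omega
      rw [hne, Nat.add_mul_div_right _ _ (by omega : 0 < e),
          Nat.add_mul_mod_self_right, Nat.div_eq_of_lt hcase, Nat.mod_eq_of_lt hcase]
      have hnd : ¬ m ∣ (a * m + b + 1 + 1) := by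
        intro hdvd
        have hre : a * m + b + 1 + 1 = a * m + (b + 2) := by ring
        rw [hre] at hdvd
        have h2 : m ∣ b + 2 := (Nat.dvd_add_right (dvd_mul_left m a)).mp hdvd
        have := Nat.le_of_dvd (by omega) h2
        omega
      unfold pvNext
      rw [if_neg hnd]
      ring
    · -- the next index closes the block: it is the skipped multiple of m plus one
      have hbe : b + 1 = e := by omega
      have hdvd : m ∣ (a * m + b + 1 + 1) := by
        have hre : a * m + b + 1 + 1 = (a + 1) * m := by
          have : b + 2 = m := by omega
          rw [Nat.add_mul, one_mul, ← this]; ring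
        rw [hre]
        exact dvd_mul_left m (a + 1)
      have hne : n = (a + 1) * e := by
        have hx : (a + 1) * e = e * a + e := by ring
        omega
      rw [hne, Nat.mul_div_cancel _ (by omega : 0 < e), Nat.mul_mod_left]
      unfold pvNext
      rw [if_pos hdvd]
      have hgoal : (a + 1) * m = a * m + m := by ring
      rw [hgoal]
      omega

-- Gauss-sum identity for pvFS
theorem pvFS_closed (m K : Nat) (hm : 2 ≤ m) :
    2 * pvFS m K + m * ((K / m) * (K / m + 1)) = K * (K + 1) := by
  induction K with
  | zero => simp [pvFS]
  | succ K ih =>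
    rw [pvFS_succ, Nat.succ_div]
    by_cases hdvd : m ∣ K + 1
    · rw [if_pos hdvd, if_pos hdvd]
      obtain ⟨c, hc⟩ := hdvd
      have hcq : (K + 1) / m = c := by rw [hc, Nat.mul_div_cancel_left _ (by omega)]
      have hq1 : c = K / m + 1 := by
        rw [← hcq, Nat.succ_div, if_pos ⟨c, hc⟩]
      have hQ : m * (K / m + 1) = K + 1 := by rw [← hq1, ← hc]
      zify at ih hQ ⊢
      linear_combination ih + 2 * hQ
    · rw [if_neg hdvd, if_neg hdvd]
      zify at ih ⊢
      linear_combination ih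

-- ===== VERDICT (by name: the statement is the Claim_ definition above) =====
theorem sum_elements_dn_spec : Claim_equal_sum_elements_dn := by
  intro div nondiv count _ hpre
  unfold Spec_sum_elements_dn sum_elements_dn sum_elements_dn_alt
  by_cases hc : count ≤ 0
  · rw [if_pos hc, pvLoopA, if_neg (by omega)]
  · rw [if_neg hc]
    have hn : nondiv ≠ 0 := by
      rcases hpre with h | ⟨h1, h2⟩; · omega
      exact h1
    have hd : ¬ nondiv ∣ div := by
      rcases hpre with h | ⟨h1, h2⟩; · omega
      exact h2
    rw [pvGcdB_eq]
    set m := nondiv.natAbs / Nat.gcd div.natAbs nondiv.natAbs with hmdef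
    have hm2 : 2 ≤ m := pv_m_ge_two div nondiv hn hd
    set c := count.toNat with hcdef
    have hc1 : 1 ≤ c := by omega
    -- run the loop lemma from number = div = div * (0 + 1)
    have hfuel : pvNV m 0 c ≤ 0 + (c * nondiv.natAbs + 1) := by
      have h1 := pvNV_le m 0 c hm2
      have h2 : c * m ≤ c * nondiv.natAbs :=
        Nat.mul_le_mul_left c (Nat.div_le_self _ _)
      omega
    have hrun := pv_loop_eq div nondiv hn hd (c * nondiv.natAbs + 1) 0 count 0 (by
      rw [← hmdef]
      have : count.toNat = c := rfl
      rw [this]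
      exact hfuel)
    rw [← hmdef, ← hcdef] at hrun
    have hnum0 : div * (((0 : Nat) : Int) + 1) = div := by push_cast; ring
    rw [hnum0] at hrun
    rw [hrun]
    have hFS0 : pvFS m 0 = 0 := by simp [pvFS]
    have htoN : (count - 1).toNat = c - 1 := by omega
    have hKeq : pvNV m 0 c =
        (count - 1).toNat / (m - 1) * m + (count - 1).toNat % (m - 1) + 1 := by
      rw [pvNV_closed m c hm2 hc1, htoN]
    set K := (count - 1).toNat / (m - 1) * m + (count - 1).toNat % (m - 1) + 1 with hKdef
    set Q := K / m with hQ
    have hFS : 2 * pvFS m K + m * (Q * (Q + 1)) = K * (K + 1) := pvFS_closed m K hm2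
    have hx : K * (K + 1) - m * (Q * (Q + 1)) = 2 * pvFS m K := by
      rw [← hFS]; omega
    have hsub : (K * (K + 1) - m * (Q * (Q + 1))) / 2 = pvFS m K := by
      rw [hx]; omega
    show 0 + div * ((pvFS m (pvNV m 0 c) : Int) - (pvFS m 0 : Int)) =
      div * (((K * (K + 1) - m * (Q * (Q + 1))) / 2 : Nat) : Int)
    rw [hKeq, hsub, hFS0]
    push_cast
    ring
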